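-- pv_equiv track=rewrite | github.com/mirmik/voice-input | stt_server_streaming.py | merge_parts
-- ===== SOURCE A (Python) =====
-- def merge_parts(parts):
--     if not parts:
--         return ""
--     result = parts[0]
--     for part in parts[1:]:
--         if not part:
--             continue
--         words_r = result.split()
--         words_p = part.split()
--         best = 0
--         for n in range(1, min(8, len(words_r), len(words_p)) + 1):
--             if words_r[-n:] == words_p[:n]:
--                 best = n
--         if best > 0:
--             result = result + " " + " ".join(words_p[best:])
--         else:
--             result = result + " " + part
--     return result.strip()
-- ===== SOURCE B (Python) =====
-- def _overlap(tail, head):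
--     # longest n with tail[-n:] == head[:n], via the KMP prefix function of
--     # head + [None] + tail (None is a sentinel that matches no word)
--     s = head + [None] + tail
--     pi = [0] * len(s)
--     k = 0
--     for i in range(1, len(s)):
--         while k > 0 and s[i] != s[k]:
--             k = pi[k - 1]
--         if s[i] == s[k]:
--             k += 1
--         pi[i] = k
--     return pi[-1]
--
-- def merge_parts(parts):
--     if not parts:
--         return ""
--     fragments = [parts[0]]
--     words = parts[0].split()
--     for part in parts[1:]:
--         if not part:
--             continue
--         words_p = part.split()
--         best = _overlap(words[-8:], words_p[:8])
--         if best > 0: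
--             added = words_p[best:]
--             fragments.append(" ".join(added))
--         else:
--             added = words_p
--             fragments.append(part)
--         words += added
--     return " ".join(fragments).strip()
-- ===== Notes on version B (the rewrite author's own statement) =====
-- stated objective: faster
-- what changed: B computes each overlap with the KMP prefix function of head+[sentinel]+tail instead of A's nested suffix/prefix slice comparisons, keeps an incremental word list (matching against at most the last 8 words) instead of re-splitting the whole accumulated result every iteration, and collects fragments to join once at the end.
import Mathlib
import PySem

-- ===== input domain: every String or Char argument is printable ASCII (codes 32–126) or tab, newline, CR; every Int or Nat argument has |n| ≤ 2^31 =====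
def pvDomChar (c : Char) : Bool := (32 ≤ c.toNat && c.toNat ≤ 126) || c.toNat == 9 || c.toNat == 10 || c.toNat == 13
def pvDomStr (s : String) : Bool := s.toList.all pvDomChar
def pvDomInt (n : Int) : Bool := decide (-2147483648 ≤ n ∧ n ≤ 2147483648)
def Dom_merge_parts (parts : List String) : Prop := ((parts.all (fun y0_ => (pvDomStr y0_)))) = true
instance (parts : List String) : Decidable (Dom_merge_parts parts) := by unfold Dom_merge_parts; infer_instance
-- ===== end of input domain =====

-- B finds each overlap with the KMP prefix function of head+[sentinel]+tail instead of A's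
-- nested slice comparisons, keeps an incremental word list instead of re-splitting the growing
-- result, and joins collected fragments once at the end; same return value.

-- ===== PORT A =====
def mergeStepA (result part : String) : String :=
  if part = "" then result
  else
    let words_r := PySem.Str.split₀ result
    let words_p := PySem.Str.split₀ part
    let m : Nat := min 8 (min words_r.length words_p.length)
    let best : Int := (PySem.List.pyRange 1 ((m : Int) + 1) 1).foldl
      (fun best n =>
        if PySem.List.slice words_r (some (-n)) none = PySem.List.slice words_p none (some n)
        then n else best) 0
    if best > 0 then
      result ++ " " ++ PySem.Str.join " " (PySem.List.slice words_p (some best) none)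
    else
      result ++ " " ++ part

def merge_parts (parts : List String) : String :=
  match parts with
  | [] => ""
  | p :: rest => PySem.Str.strip (rest.foldl mergeStepA p)

-- ===== PORT B =====
-- the KMP while-loop 'while k > 0 and s[i] != s[k]: k = pi[k-1]'; fuel = initial k suffices
-- because prefix-function values satisfy pi[j] ≤ j, so k strictly decreases
def kmpFall (s : List (Option String)) (pi : List Nat) (x : Option String) : Nat → Nat → Nat
  | 0, k => k
  | fuel+1, k => if 0 < k ∧ x ≠ s.getD k none then kmpFall s pi x fuel (pi.getD (k-1) 0) else k

-- one iteration of the 'for i in range(1, len(s))' loop of _overlap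
def kmpStep (s : List (Option String)) (st : List Nat × Nat) (i : Nat) : List Nat × Nat :=
  let k1 := kmpFall s st.1 (s.getD i none) st.2 st.2
  let k2 := if s.getD i none = s.getD k1 none then k1 + 1 else k1
  (st.1 ++ [k2], k2)

-- _overlap(tail, head): prefix function of head + [None] + tail, last value
def overlapKmp (tail head : List String) : Nat :=
  let s : List (Option String) := head.map some ++ none :: tail.map some
  let st := (List.range' 1 (s.length - 1)).foldl (kmpStep s) ([0], 0)
  st.1.getLastD 0

def mergeStepB (st : List String × List String) (part : String) : List String × List String :=
  if part = "" then st
  else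
    let words_p := PySem.Str.split₀ part
    let best : Nat := overlapKmp (PySem.List.slice st.2 (some (-8)) none)
                                 (PySem.List.slice words_p none (some 8))
    if best > 0 then
      let added := PySem.List.slice words_p (some (best : Int)) none
      (st.1 ++ [PySem.Str.join " " added], st.2 ++ added)
    else
      (st.1 ++ [part], st.2 ++ words_p)

def merge_parts_alt (parts : List String) : String :=
  match parts with
  | [] => ""
  | p :: rest =>
    let st := rest.foldl mergeStepB ([p], PySem.Str.split₀ p)
    PySem.Str.strip (PySem.Str.join " " st.1)

-- ===== PRECONDITION & SPEC =====
def Spec_merge_parts (parts : List String) (out : String) : Prop := out = merge_parts_alt parts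
instance (parts : List String) (out : String) : Decidable (Spec_merge_parts parts out) := by unfold Spec_merge_parts; infer_instance

-- ===== CLAIM (what is proved, stated in full; the proofs are below) =====
def Claim_equal_merge_parts : Prop := ∀ (parts : List String), Dom_merge_parts parts → Spec_merge_parts parts (merge_parts parts)

-- ===== LEMMAS AND PROOFS =====

-- the prefix-function value at position i (longest proper border of s.take i)
def pvPf (s : List (Option String)) (i : Nat) : Nat :=
  Nat.findGreatest (fun k => s.take k = (s.take i).drop (i - k)) (i - 1)

-- the specified best overlap: greatest n with tail[-n:] == head[:n]
def pvBestOv (tail head : List String) : Nat :=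
  Nat.findGreatest (fun n => tail.drop (tail.length - n) = head.take n)
    (min tail.length head.length)

theorem pvP0 (s : List (Option String)) (i : Nat) :
    s.take 0 = (s.take i).drop (i - 0) := by simp

theorem pvFGcongr (P Q : Nat → Prop) [DecidablePred P] [DecidablePred Q] (m : Nat)
    (h : ∀ n, n ≤ m → (P n ↔ Q n)) : Nat.findGreatest P m = Nat.findGreatest Q m := by
  induction m with
  | zero => rfl
  | succ m ih =>
    rw [Nat.findGreatest_succ, Nat.findGreatest_succ]
    by_cases hp : P (m+1)
    · rw [if_pos hp, if_pos ((h (m+1) le_rfl).mp hp)]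
    · rw [if_neg hp, if_neg (fun hq => hp ((h (m+1) le_rfl).mpr hq)),
        ih (fun n hn => h n (by omega))]

theorem pvBordTrans (s : List (Option String)) {i k b : Nat} (hk : k ≤ i) (hb : b ≤ k)
    (hPib : s.take b = (s.take i).drop (i - b))
    (hPik : s.take k = (s.take i).drop (i - k)) :
    s.take b = (s.take k).drop (k - b) := by
  rw [hPik, List.drop_drop, hPib]; congr 1; omega

theorem pvBordLift (s : List (Option String)) {i k b : Nat} (hk : k ≤ i) (hb : b ≤ k)
    (hPkb : s.take b = (s.take k).drop (k - b))
    (hPik : s.take k = (s.take i).drop (i - k)) :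
    s.take b = (s.take i).drop (i - b) := by
  rw [hPkb, hPik, List.drop_drop]; congr 1; omega

theorem pvBordExt (s : List (Option String)) {i k : Nat} (hi : i < s.length) (hk : k < i) :
    (s.take (k+1) = (s.take (i+1)).drop (i - k)) ↔
      (s.take k = (s.take i).drop (i - k) ∧ s[k]'(by omega) = s[i]) := by
  have hk' : k < s.length := by omega
  have h1 : s.take (k+1) = s.take k ++ [s[k]'hk'] := by
    rw [List.take_add_one]
    simp [List.getElem?_eq_getElem hk']
  have h2 : s.take (i+1) = s.take i ++ [s[i]] := by
    rw [List.take_add_one]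
    simp [List.getElem?_eq_getElem hi]
  have hlen : (s.take i).length = i := by simp; omega
  rw [h1, h2, List.drop_append, hlen, show i - k - i = 0 by omega, List.drop_zero,
    ← List.concat_eq_append, ← List.concat_eq_append, List.concat_inj]

theorem pvPfLe (s : List (Option String)) (i : Nat) : pvPf s i ≤ i - 1 :=
  Nat.findGreatest_le _

theorem pvPfBord (s : List (Option String)) (i : Nat) :
    s.take (pvPf s i) = (s.take i).drop (i - pvPf s i) := by
  unfold pvPf
  exact Nat.findGreatest_spec (P := fun k => s.take k = (s.take i).drop (i - k))
    (Nat.zero_le _) (pvP0 s i)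

theorem pvPfGreatest (s : List (Option String)) (i b : Nat) (hb : b ≤ i - 1)
    (h : s.take b = (s.take i).drop (i - b)) : b ≤ pvPf s i := by
  unfold pvPf
  exact Nat.le_findGreatest hb h

theorem pvFall (s : List (Option String)) (pi : List Nat) (x : Option String) (i : Nat)
    (hpi : ∀ j, j + 2 ≤ i → pi.getD j 0 = pvPf s (j + 1)) :
    ∀ f k, k ≤ f → k ≤ i - 1 → s.take k = (s.take i).drop (i - k) →
    (kmpFall s pi x f k ≤ k ∧ kmpFall s pi x f k ≤ i - 1 ∧
     s.take (kmpFall s pi x f k) = (s.take i).drop (i - kmpFall s pi x f k) ∧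
     (kmpFall s pi x f k = 0 ∨ x = s.getD (kmpFall s pi x f k) none) ∧
     (∀ b, b ≤ k → s.take b = (s.take i).drop (i - b) → x = s.getD b none →
        b ≤ kmpFall s pi x f k)) := by
  intro f
  induction f with
  | zero =>
    intro k hkf hki hP
    have hk0 : k = 0 := by omega
    subst hk0
    simp only [kmpFall]
    exact ⟨le_rfl, by omega, hP, by simp, fun b hb _ _ => hb⟩
  | succ f ih =>
    intro k hkf hki hP
    by_cases hc : 0 < k ∧ x ≠ s.getD k none
    · have hread : pi.getD (k-1) 0 = pvPf s k := by
        have h := hpi (k-1) (by omega)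
        rwa [show k - 1 + 1 = k by omega] at h
      have hkle : k ≤ i := by omega
      have hpfle : pvPf s k ≤ k - 1 := pvPfLe s k
      have hP' : s.take (pvPf s k) = (s.take i).drop (i - pvPf s k) :=
        pvBordLift s hkle (by omega) (pvPfBord s k) hP
      simp only [kmpFall, if_pos hc, hread]
      have IH := ih (pvPf s k) (by omega) (by omega) hP'
      refine ⟨le_trans IH.1 (by omega), IH.2.1, IH.2.2.1, IH.2.2.2.1, ?_⟩
      intro b hb hPb hxb
      have hbk : b < k := lt_of_le_of_ne hb (fun h => hc.2 (h ▸ hxb))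
      have hPkb : s.take b = (s.take k).drop (k - b) := pvBordTrans s hkle (by omega) hPb hP
      have hble : b ≤ pvPf s k := by
        unfold pvPf
        exact Nat.le_findGreatest (by omega) hPkb
      exact IH.2.2.2.2 b hble hPb hxb
    · simp only [kmpFall, if_neg hc]
      push Not at hc
      refine ⟨le_rfl, hki, hP, ?_, fun b hb _ _ => hb⟩
      by_cases h0 : k = 0
      · exact Or.inl h0
      · exact Or.inr (hc (by omega))

theorem pvPfSucc (s : List (Option String)) (pi : List Nat) (i : Nat)
    (h1 : 1 ≤ i) (hi : i < s.length)
    (hpi : ∀ j, j + 2 ≤ i → pi.getD j 0 = pvPf s (j + 1)) :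
    (if s.getD i none = s.getD (kmpFall s pi (s.getD i none) (pvPf s i) (pvPf s i)) none
     then kmpFall s pi (s.getD i none) (pvPf s i) (pvPf s i) + 1
     else kmpFall s pi (s.getD i none) (pvPf s i) (pvPf s i)) = pvPf s (i+1) := by
  obtain ⟨hrk, hri, hPr, hstop, hmax⟩ :=
    pvFall s pi (s.getD i none) i hpi (pvPf s i) (pvPf s i) le_rfl (pvPfLe s i) (pvPfBord s i)
  have hpfi : pvPf s i ≤ i - 1 := pvPfLe s i
  set r := kmpFall s pi (s.getD i none) (pvPf s i) (pvPf s i) with hrdef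
  have hrlt : r < i := by omega
  have hrlen : r < s.length := by omega
  have hGrow : ∀ c, c < i → s.take c = (s.take i).drop (i - c) →
      s.getD c none = s.getD i none → s.take (c+1) = (s.take (i+1)).drop (i + 1 - (c+1)) := by
    intro c hclt hPc hxc
    rw [show i + 1 - (c+1) = i - c by omega]
    refine (pvBordExt s hi hclt).mpr ⟨hPc, ?_⟩
    rw [← List.getD_eq_getElem s none (show c < s.length by omega),
      ← List.getD_eq_getElem s none hi]
    exact hxc
  have hShrink : ∀ c, c + 1 ≤ i → s.take (c+1) = (s.take (i+1)).drop (i + 1 - (c+1)) →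
      (s.take c = (s.take i).drop (i - c) ∧ s.getD i none = s.getD c none) := by
    intro c hcle hq
    have hclt : c < i := by omega
    rw [show i + 1 - (c+1) = i - c by omega] at hq
    have hext := (pvBordExt s hi hclt).mp hq
    refine ⟨hext.1, ?_⟩
    rw [List.getD_eq_getElem s none hi, List.getD_eq_getElem s none (by omega)]
    exact hext.2.symm
  by_cases hbr : s.getD i none = s.getD r none
  · rw [if_pos hbr]
    apply le_antisymm
    · exact pvPfGreatest s (i+1) (r+1) (by omega) (hGrow r hrlt hPr hbr.symm)
    · have hq1 : pvPf s (i+1) ≤ i := by have := pvPfLe s (i+1); omega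
      have hq2 := pvPfBord s (i+1)
      rcases Nat.eq_zero_or_pos (pvPf s (i+1)) with h0 | hpos
      · omega
      · obtain ⟨c, hc⟩ : ∃ c, pvPf s (i+1) = c + 1 := ⟨pvPf s (i+1) - 1, by omega⟩
        rw [hc] at hq2 hq1 ⊢
        obtain ⟨hPc, hxc⟩ := hShrink c (by omega) hq2
        have hck : c ≤ pvPf s i := pvPfGreatest s i c (by omega) hPc
        have := hmax c hck hPc hxc
        omega
  · rw [if_neg hbr]
    have hr0 : r = 0 := by
      rcases hstop with h | h
      · exact h
      · exact absurd h hbr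
    rw [hr0]
    symm
    by_contra hne
    have hpos : 0 < pvPf s (i+1) := Nat.pos_of_ne_zero hne
    obtain ⟨c, hc⟩ : ∃ c, pvPf s (i+1) = c + 1 := ⟨pvPf s (i+1) - 1, by omega⟩
    have hq1 : pvPf s (i+1) ≤ i := by have := pvPfLe s (i+1); omega
    have hq2 := pvPfBord s (i+1)
    rw [hc] at hq2 hq1
    obtain ⟨hPc, hxc⟩ := hShrink c (by omega) hq2
    have hck : c ≤ pvPf s i := pvPfGreatest s i c (by omega) hPc
    have hcr := hmax c hck hPc hxc
    rw [hr0] at hcr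
    have hc0 : c = 0 := by omega
    rw [hc0] at hxc
    rw [hr0] at hbr
    exact hbr hxc

theorem pvKmpLoop (s : List (Option String)) (t : Nat) (ht : t ≤ s.length - 1) :
    (List.range' 1 t).foldl (kmpStep s) ([0], 0) =
      ((List.range (t+1)).map (fun j => pvPf s (j+1)), pvPf s (t+1)) := by
  induction t with
  | zero =>
    have h1 : pvPf s 1 = 0 := rfl
    simp [h1]
  | succ t ih =>
    have hlen : t + 1 < s.length := by omega
    rw [List.range'_concat, List.foldl_append, ih (by omega)]
    have hidx : 1 + 1 * t = t + 1 := by omega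
    rw [hidx]
    simp only [List.foldl_cons, List.foldl_nil]
    have hpi : ∀ j, j + 2 ≤ t + 1 →
        ((List.range (t+1)).map (fun j => pvPf s (j+1))).getD j 0 = pvPf s (j + 1) := by
      intro j hj
      rw [List.getD_eq_getElem _ _ (by simp; omega)]
      simp
    have hsucc := pvPfSucc s ((List.range (t+1)).map (fun j => pvPf s (j+1))) (t+1)
      (by omega) hlen hpi
    simp only [kmpStep]
    rw [hsucc]
    rw [List.range_succ (n := t+1), List.map_append]
    rfl

theorem pvOverlapPf (tail head : List String) :
    overlapKmp tail head =
      pvPf (head.map some ++ none :: tail.map some)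
        (head.map some ++ none :: tail.map some).length := by
  have hlen : 1 ≤ (head.map some ++ none :: tail.map some).length := by
    simp only [List.length_append, List.length_cons]
    omega
  show (((List.range' 1 ((head.map some ++ none :: tail.map some).length - 1)).foldl
      (kmpStep (head.map some ++ none :: tail.map some)) ([0], 0)).1).getLastD 0 = _
  rw [pvKmpLoop (head.map some ++ none :: tail.map some)
      ((head.map some ++ none :: tail.map some).length - 1) le_rfl]
  simp only
  rw [show (head.map some ++ none :: tail.map some).length - 1 + 1
      = (head.map some ++ none :: tail.map some).length by omega]
  rw [show (head.map some ++ none :: tail.map some).length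
      = ((head.map some ++ none :: tail.map some).length - 1) + 1 by omega,
    List.range_succ, List.map_append]
  simp only [List.map_cons, List.map_nil]
  rw [List.getLastD_concat]

theorem pvIdxNone (tail head : List String) {j : Nat}
    (hj : j < (head.map some ++ none :: tail.map some).length)
    (h : (head.map some ++ none :: tail.map some)[j] = none) : j = head.length := by
  rcases lt_trichotomy j head.length with hlt | he | hgt
  · rw [List.getElem_append_left (by simpa using hlt)] at h
    simp at h
  · exact he
  · exfalso
    rw [List.getElem_append_right (by simp; omega)] at h
    rw [List.getElem_cons] at h
    simp at h
    omega

theorem pvSentNone (tail head : List String)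
    (h : head.length < (head.map some ++ none :: tail.map some).length) :
    (head.map some ++ none :: tail.map some)[head.length] = none := by
  rw [List.getElem_append_right (by simp)]
  simp

theorem pvTakeLow (tail head : List String) {k : Nat} (hk : k ≤ head.length) :
    (head.map some ++ none :: tail.map some).take k = (head.take k).map some := by
  rw [List.take_append, show k - (head.map some).length = 0 by simp; omega]
  simp [List.map_take]

theorem pvDropLow (tail head : List String) {k : Nat} (hk : k ≤ tail.length) :
    (head.map some ++ none :: tail.map some).drop
        ((head.map some ++ none :: tail.map some).length - k)
      = (tail.drop (tail.length - k)).map some := by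
  have hL : (head.map some ++ none :: tail.map some).length
      = head.length + tail.length + 1 := by simp; omega
  rw [List.drop_append]
  rw [List.drop_eq_nil_of_le (by simp [hL]; omega)]
  rw [show (head.map some ++ none :: tail.map some).length - k - (head.map some).length
      = (tail.length - k) + 1 by simp [hL]; omega]
  simp [List.map_drop]

theorem pvBordLow (tail head : List String) {k : Nat}
    (hk : k ≤ min tail.length head.length) :
    ((head.map some ++ none :: tail.map some).take k =
       ((head.map some ++ none :: tail.map some).take
         (head.map some ++ none :: tail.map some).length).drop
         ((head.map some ++ none :: tail.map some).length - k)) ↔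
      tail.drop (tail.length - k) = head.take k := by
  rw [List.take_length, pvTakeLow tail head (le_trans hk (min_le_right _ _)),
    pvDropLow tail head (le_trans hk (min_le_left _ _))]
  constructor
  · intro h
    exact (List.map_injective_iff.mpr (Option.some_injective _) h).symm
  · intro h
    rw [h]

theorem pvBordHigh (tail head : List String) {k : Nat}
    (hk : min tail.length head.length < k)
    (hk2 : k ≤ (head.map some ++ none :: tail.map some).length - 1) :
    ¬ ((head.map some ++ none :: tail.map some).take k =
       ((head.map some ++ none :: tail.map some).take
         (head.map some ++ none :: tail.map some).length).drop
         ((head.map some ++ none :: tail.map some).length - k)) := by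
  intro hP
  rw [List.take_length] at hP
  have hL : (head.map some ++ none :: tail.map some).length
      = head.length + tail.length + 1 := by simp; omega
  have hlen1 : ((head.map some ++ none :: tail.map some).take k).length = k := by
    simp; omega
  have hlen2 : ((head.map some ++ none :: tail.map some).drop
      ((head.map some ++ none :: tail.map some).length - k)).length = k := by
    simp; omega
  by_cases hlh : head.length < k
  · -- sentinel is inside the prefix of length k
    have he := List.getElem_of_eq hP (i := head.length) (by omega)
    rw [List.getElem_take, List.getElem_drop] at he
    have h1 : (head.map some ++ none :: tail.map some)[head.length]'(by omega) = none :=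
      pvSentNone tail head (by omega)
    rw [h1] at he
    have := pvIdxNone tail head
      (j := (head.map some ++ none :: tail.map some).length - k + head.length)
      (by omega) he.symm
    omega
  · -- then tail.length < k ≤ head.length: sentinel inside the suffix
    have hlt : tail.length < k := by omega
    have hole : k - tail.length - 1 < k := by omega
    have he := List.getElem_of_eq hP (i := k - tail.length - 1) (by omega)
    rw [List.getElem_take, List.getElem_drop] at he
    have hidx : (head.map some ++ none :: tail.map some).length - k + (k - tail.length - 1)
        = head.length := by omega
    have h1 : (head.map some ++ none :: tail.map some)[k - tail.length - 1]'(by omega)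
        = some (head[k - tail.length - 1]'(by omega)) := by
      rw [List.getElem_append_left (by simp; omega)]
      simp
    rw [h1] at he
    simp only [hidx] at he
    rw [pvSentNone tail head (by omega)] at he
    simp at he

theorem pvOverlapEq (tail head : List String) :
    overlapKmp tail head = pvBestOv tail head := by
  rw [pvOverlapPf]
  have hL : (head.map some ++ none :: tail.map some).length
      = head.length + tail.length + 1 := by simp; omega
  apply le_antisymm
  · have hP := pvPfBord (head.map some ++ none :: tail.map some)
      (head.map some ++ none :: tail.map some).length
    have hle := pvPfLe (head.map some ++ none :: tail.map some)
      (head.map some ++ none :: tail.map some).length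
    by_cases hm : pvPf (head.map some ++ none :: tail.map some)
        (head.map some ++ none :: tail.map some).length ≤ min tail.length head.length
    · unfold pvBestOv
      exact Nat.le_findGreatest hm ((pvBordLow tail head hm).mp hP)
    · exact absurd hP (pvBordHigh tail head (by omega) hle)
  · have hb0 : tail.drop (tail.length - 0) = head.take 0 := by simp
    have hQ := Nat.findGreatest_spec
      (P := fun n => tail.drop (tail.length - n) = head.take n)
      (n := min tail.length head.length) (Nat.zero_le _) hb0
    have hble : pvBestOv tail head ≤ min tail.length head.length := Nat.findGreatest_le _
    have hPb := (pvBordLow tail head hble).mpr hQ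
    exact pvPfGreatest _ _ _ (by omega) hPb

theorem pvAfold (ws wp : List String) (m : Nat) :
    (PySem.List.pyRange 1 ((m : Int) + 1) 1).foldl
      (fun best n =>
        if PySem.List.slice ws (some (-n)) none = PySem.List.slice wp none (some n)
        then n else best) 0
    = (Nat.findGreatest (fun n => ws.drop (ws.length - n) = wp.take n) m : Int) := by
  induction m with
  | zero =>
    have h0 : PySem.List.pyRange 1 (((0:Nat) : Int) + 1) 1 = [] := by decide
    rw [h0]
    rfl
  | succ m ih =>
    have hcast : (((m+1 : Nat)) : Int) + 1 = ((m : Int) + 1) + 1 := by push_cast; ring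
    rw [hcast, PySem.List.pyRange_one_succ_right (by omega), List.foldl_append]
    simp only [List.foldl_cons, List.foldl_nil]
    rw [ih]
    have hsl1 : PySem.List.slice ws (some (-((m : Int) + 1))) none
        = ws.drop (ws.length - (m+1)) := by
      rw [show ((m : Int) + 1) = (((m+1:Nat)) : Int) by push_cast; ring]
      exact PySem.List.slice_from_neg_natCast ws (m+1) (by omega)
    have hsl2 : PySem.List.slice wp none (some ((m : Int) + 1)) = wp.take (m+1) := by
      rw [PySem.List.slice_to wp (by omega),
        show ((m : Int) + 1).toNat = m + 1 by omega]
    rw [hsl1, hsl2, Nat.findGreatest_succ]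
    by_cases hc : ws.drop (ws.length - (m+1)) = wp.take (m+1)
    · rw [if_pos hc, if_pos hc]
      omega
    · rw [if_neg hc, if_neg hc]

theorem pvBridge (ws wp : List String) :
    ((overlapKmp (PySem.List.slice ws (some (-8)) none)
        (PySem.List.slice wp none (some 8)) : Nat) : Int)
    = (PySem.List.pyRange 1 ((min 8 (min ws.length wp.length) : Nat) + 1) 1).foldl
        (fun best n =>
          if PySem.List.slice ws (some (-n)) none = PySem.List.slice wp none (some n)
          then n else best) 0 := by
  rw [pvAfold]
  congr 1
  rw [pvOverlapEq]
  have htail : PySem.List.slice ws (some (-8)) none = ws.drop (ws.length - 8) :=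
    PySem.List.slice_from_neg_ofNat ws 8 (by norm_num)
  have hhead : PySem.List.slice wp none (some 8) = wp.take 8 := by
    rw [PySem.List.slice_to wp (by norm_num)]
    rfl
  rw [htail, hhead]
  unfold pvBestOv
  have hb : min (ws.drop (ws.length - 8)).length (wp.take 8).length
      = min 8 (min ws.length wp.length) := by
    simp
    omega
  rw [hb]
  apply pvFGcongr
  intro n hn
  rw [List.drop_drop, List.take_take]
  rw [show ws.length - 8 + ((ws.drop (ws.length - 8)).length - n) = ws.length - n by
        simp; omega,
      show min n 8 = n by omega]

-- two strings are equal when their character lists are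
theorem pvStrExt (x y : String) (h : x.toList = y.toList) : x = y := by
  have h2 := congrArg String.ofList h
  rwa [String.ofList_toList, String.ofList_toList] at h2

-- split₀.go with a non-empty accumulator just prepends the reversed accumulator
theorem pvGoAcc (s : List Char) : ∀ (cur : List Char) (acc : List (List Char)),
    PySem.Chars.split₀.go s cur acc = acc.reverse ++ PySem.Chars.split₀.go s cur [] := by
  induction s with
  | nil =>
    intro cur acc
    by_cases h : cur.isEmpty = true <;> simp [PySem.Chars.split₀.go, h]
  | cons c rest ih =>
    intro cur acc
    by_cases hs : PySem.Chars.isspace c = true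
    · by_cases h : cur.isEmpty = true
      · simp only [PySem.Chars.split₀.go, hs, h, if_true]
        exact ih [] acc
      · simp only [PySem.Chars.split₀.go, hs, h, if_true]
        rw [ih [] (cur.reverse :: acc), ih [] [cur.reverse]]
        simp
    · simp only [PySem.Chars.split₀.go, hs]
      exact ih (c :: cur) acc

-- split₀.go distributes over a single-space concatenation
theorem pvGoSplit (b : List Char) : ∀ (a cur : List Char),
    PySem.Chars.split₀.go (a ++ ' ' :: b) cur [] =
      PySem.Chars.split₀.go a cur [] ++ PySem.Chars.split₀.go b [] [] := by
  intro a
  induction a with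
  | nil =>
    intro cur
    by_cases h : cur.isEmpty = true <;>
      simp [PySem.Chars.split₀.go, h, pvGoAcc b [] [cur.reverse],
        (show PySem.Chars.isspace ' ' = true from rfl)]
  | cons c a ih =>
    intro cur
    by_cases hs : PySem.Chars.isspace c = true
    · by_cases h : cur.isEmpty = true
      · simp only [List.cons_append, PySem.Chars.split₀.go, hs, h, if_true]
        exact ih []
      · simp only [List.cons_append, PySem.Chars.split₀.go, hs, h, if_true]
        rw [pvGoAcc (a ++ ' ' :: b) [] [cur.reverse], pvGoAcc a [] [cur.reverse], ih []]
        simp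
    · simp only [List.cons_append, PySem.Chars.split₀.go, hs]
      exact ih (c :: cur)

-- Python split() distributes over a single-space concatenation
theorem pvSplitAppend (a b : List Char) :
    PySem.Chars.split₀ (a ++ ' ' :: b) = PySem.Chars.split₀ a ++ PySem.Chars.split₀ b := by
  simp only [PySem.Chars.split₀]
  exact pvGoSplit b a []

-- every word produced by split₀.go is non-empty and whitespace-free
theorem pvGoWords (s : List Char) : ∀ (cur : List Char) (acc : List (List Char)),
    (∀ w ∈ acc, w ≠ [] ∧ ∀ c ∈ w, PySem.Chars.isspace c = false) →
    (∀ c ∈ cur, PySem.Chars.isspace c = false) →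
    ∀ w ∈ PySem.Chars.split₀.go s cur acc, w ≠ [] ∧ ∀ c ∈ w, PySem.Chars.isspace c = false := by
  induction s with
  | nil =>
    intro cur acc hacc hcur w hw
    by_cases h : cur.isEmpty = true
    · simp only [PySem.Chars.split₀.go, h, if_true, List.mem_reverse] at hw
      exact hacc w hw
    · simp only [PySem.Chars.split₀.go, h] at hw
      simp only [Bool.false_eq_true, if_false, List.reverse_cons, List.mem_append,
        List.mem_reverse, List.mem_singleton] at hw
      rcases hw with hw | hw
      · exact hacc w hw
      · subst hw
        refine ⟨by simpa using (List.isEmpty_eq_false_iff.mp (by simpa using h)), ?_⟩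
        intro c hc
        exact hcur c (List.mem_reverse.mp hc)
  | cons c rest ih =>
    intro cur acc hacc hcur w hw
    by_cases hs : PySem.Chars.isspace c = true
    · by_cases h : cur.isEmpty = true
      · simp only [PySem.Chars.split₀.go, hs, h, if_true] at hw
        exact ih [] acc hacc (by simp) w hw
      · simp only [PySem.Chars.split₀.go, hs, h, if_true] at hw
        refine ih [] (cur.reverse :: acc) ?_ (by simp) w hw
        intro v hv
        rcases List.mem_cons.mp hv with hv | hv
        · subst hv
          refine ⟨by simpa using (List.isEmpty_eq_false_iff.mp (by simpa using h)), ?_⟩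
          intro d hd
          exact hcur d (List.mem_reverse.mp hd)
        · exact hacc v hv
    · simp only [PySem.Chars.split₀.go, hs] at hw
      refine ih (c :: cur) acc hacc ?_ w hw
      intro d hd
      rcases List.mem_cons.mp hd with hd | hd
      · subst hd; simpa using hs
      · exact hcur d hd

-- every word produced by split() is non-empty and whitespace-free
theorem pvSplitWords (s : List Char) :
    ∀ w ∈ PySem.Chars.split₀ s, w ≠ [] ∧ ∀ c ∈ w, PySem.Chars.isspace c = false := by
  simpa only [PySem.Chars.split₀] using pvGoWords s [] [] (by simp) (by simp)

-- split₀.go on whitespace-free input keeps accumulating one word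
theorem pvGoNonspace (s : List Char) : ∀ (cur : List Char) (acc : List (List Char)),
    (∀ c ∈ s, PySem.Chars.isspace c = false) →
    PySem.Chars.split₀.go s cur acc =
      if cur.reverse ++ s = [] then acc.reverse else ((cur.reverse ++ s) :: acc).reverse := by
  induction s with
  | nil =>
    intro cur acc _
    by_cases h : cur.isEmpty = true
    · have : cur = [] := by simpa using h
      simp [PySem.Chars.split₀.go, this]
    · have : cur ≠ [] := by simpa using (List.isEmpty_eq_false_iff.mp (by simpa using h))
      simp [PySem.Chars.split₀.go, this]
  | cons c rest ih =>
    intro cur acc hns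
    have hc : PySem.Chars.isspace c = false := hns c (by simp)
    simp only [PySem.Chars.split₀.go, hc, if_false, Bool.false_eq_true]
    rw [ih (c :: cur) acc (fun d hd => hns d (by simp [hd]))]
    simp

-- split() of a single non-empty whitespace-free word is that word
theorem pvSplitSingle (w : List Char) (h1 : w ≠ []) (h2 : ∀ c ∈ w, PySem.Chars.isspace c = false) :
    PySem.Chars.split₀ w = [w] := by
  simp only [PySem.Chars.split₀]
  rw [pvGoNonspace w [] [] h2]
  simp [h1]

-- split() inverts " ".join on non-empty whitespace-free words
theorem pvSplitJoin : ∀ (ws : List (List Char)),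
    (∀ w ∈ ws, w ≠ [] ∧ ∀ c ∈ w, PySem.Chars.isspace c = false) →
    PySem.Chars.split₀ (PySem.Chars.join [' '] ws) = ws := by
  intro ws
  induction ws with
  | nil => intro _; simp [PySem.Chars.join_nil, PySem.Chars.split₀, PySem.Chars.split₀.go]
  | cons w ws ih =>
    intro h
    cases ws with
    | nil =>
      simp only [PySem.Chars.join_singleton]
      exact pvSplitSingle w (h w (by simp)).1 (h w (by simp)).2
    | cons x xs =>
      rw [PySem.Chars.join_cons_cons]
      have : w ++ [' '] ++ PySem.Chars.join [' '] (x :: xs)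
          = w ++ ' ' :: PySem.Chars.join [' '] (x :: xs) := by simp
      rw [this, pvSplitAppend, pvSplitSingle w (h w (by simp)).1 (h w (by simp)).2,
        ih (fun v hv => h v (by simp [hv]))]
      simp

-- " ".join over Char lists distributes over snoc
theorem pvJoinSnocChars (sep x : List Char) : ∀ (l : List (List Char)), l ≠ [] →
    PySem.Chars.join sep (l ++ [x]) = PySem.Chars.join sep l ++ sep ++ x := by
  intro l
  induction l with
  | nil => intro h; exact absurd rfl h
  | cons y l ih =>
    intro _
    cases l with
    | nil => simp [PySem.Chars.join_cons_cons, PySem.Chars.join_singleton]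
    | cons z l' =>
      have h1 : ((y :: z :: l') ++ [x]) = y :: ((z :: l') ++ [x]) := by simp
      rw [h1]
      have h2 : (z :: l') ++ [x] = z :: (l' ++ [x]) := by simp
      rw [h2, PySem.Chars.join_cons_cons, ← h2, ih (by simp), PySem.Chars.join_cons_cons]
      simp

theorem pvStrSplitAppend (r f : String) :
    PySem.Str.split₀ (r ++ " " ++ f) = PySem.Str.split₀ r ++ PySem.Str.split₀ f := by
  simp only [PySem.Str.split₀]
  have h : (r ++ " " ++ f).toList = r.toList ++ ' ' :: f.toList := by
    simp [String.toList_append]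
  rw [h, pvSplitAppend, List.map_append]

theorem pvStrSplitJoin (part : String) (ws : List String)
    (h : ∀ w ∈ ws, w ∈ PySem.Str.split₀ part) :
    PySem.Str.split₀ (PySem.Str.join " " ws) = ws := by
  simp only [PySem.Str.split₀, PySem.Str.join, String.toList_ofList]
  have hsp : (" " : String).toList = [' '] := rfl
  rw [hsp, pvSplitJoin (ws.map String.toList) ?_]
  · simp [Function.comp_def, String.ofList_toList]
  · intro w hw
    rcases List.mem_map.mp hw with ⟨v, hv, rfl⟩
    have hmem : v.toList ∈ PySem.Chars.split₀ part.toList := by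
      rw [← PySem.Str.split₀_map_toList]
      exact List.mem_map_of_mem (h v hv)
    exact pvSplitWords part.toList v.toList hmem

theorem pvJoinSnoc (fr : List String) (f : String) (h : fr ≠ []) :
    PySem.Str.join " " (fr ++ [f]) = PySem.Str.join " " fr ++ " " ++ f := by
  apply pvStrExt
  simp only [PySem.Str.join, String.toList_ofList, String.toList_append, List.map_append,
    List.map_cons, List.map_nil]
  rw [pvJoinSnocChars (" ".toList) f.toList (fr.map String.toList) (by simpa using h)]

-- one merge step preserves the relation between A's string state and B's (fragments, words) state
theorem pvStep (r part : String) (fr ws : List String) (hfr : fr ≠ [])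
    (hj : PySem.Str.join " " fr = r) (hw : ws = PySem.Str.split₀ r) :
    (mergeStepB (fr, ws) part).1 ≠ [] ∧
    PySem.Str.join " " (mergeStepB (fr, ws) part).1 = mergeStepA r part ∧
    (mergeStepB (fr, ws) part).2 = PySem.Str.split₀ (mergeStepA r part) := by
  by_cases hp : part = ""
  · simp only [mergeStepA, mergeStepB, hp, if_true]
    exact ⟨hfr, hj, hw⟩
  · simp only [mergeStepA, mergeStepB, if_neg hp, ← hw]
    set wp := PySem.Str.split₀ part with hwp
    have hb := pvBridge ws wp
    rw [← hb]
    by_cases h0 : 0 < overlapKmp (PySem.List.slice ws (some (-8)) none)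
        (PySem.List.slice wp none (some 8))
    · have hA : ((overlapKmp (PySem.List.slice ws (some (-8)) none)
          (PySem.List.slice wp none (some 8)) : Nat) : Int) > 0 := by exact_mod_cast h0
      rw [if_pos h0, if_pos hA]
      refine ⟨by simp, ?_, ?_⟩
      · rw [pvJoinSnoc fr _ hfr, hj]
      · rw [pvStrSplitAppend, ← hw,
          pvStrSplitJoin part _ (fun w hws => PySem.List.mem_of_mem_slice wp _ _ hws)]
    · have hA : ¬ ((overlapKmp (PySem.List.slice ws (some (-8)) none)
          (PySem.List.slice wp none (some 8)) : Nat) : Int) > 0 := by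
        simpa using h0
      rw [if_neg h0, if_neg hA]
      refine ⟨by simp, ?_, ?_⟩
      · rw [pvJoinSnoc fr part hfr, hj]
      · rw [pvStrSplitAppend, ← hw, hwp]

theorem pvLoop : ∀ (rest : List String) (r : String) (fr ws : List String), fr ≠ [] →
    PySem.Str.join " " fr = r → ws = PySem.Str.split₀ r →
    (rest.foldl mergeStepB (fr, ws)).1 ≠ [] ∧
    PySem.Str.join " " (rest.foldl mergeStepB (fr, ws)).1 = rest.foldl mergeStepA r := by
  intro rest
  induction rest with
  | nil => intro r fr ws hfr hj _; exact ⟨hfr, hj⟩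
  | cons part rest' ih =>
    intro r fr ws hfr hj hw
    have h := pvStep r part fr ws hfr hj hw
    have heta : mergeStepB (fr, ws) part
        = ((mergeStepB (fr, ws) part).1, (mergeStepB (fr, ws) part).2) := rfl
    simp only [List.foldl_cons]
    rw [heta]
    exact ih (mergeStepA r part) _ _ h.1 h.2.1 h.2.2

-- ===== VERDICT (by name: the statement is the Claim_ definition above) =====
theorem merge_parts_spec : Claim_equal_merge_parts := by
  intro parts _
  unfold Spec_merge_parts
  cases parts with
  | nil => rfl
  | cons p rest =>
    have h0 : PySem.Str.join " " [p] = p := by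
      apply pvStrExt
      simp [PySem.Str.join, PySem.Chars.join_singleton]
    have h := pvLoop rest p [p] (PySem.Str.split₀ p) (by simp) h0 rfl
    simp only [merge_parts, merge_parts_alt]
    rw [h.2]
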